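-- pv_equiv track=rewrite | github.com/Rivoll/TicTacToe | Board.py | count_diag1
-- ===== SOURCE A (Python) =====
-- def count_diag1(board, symbol):
--     count = 0
--     for i in range(3):
--         if board[i][i] == symbol:
--             count += 1
--         elif board[i][i] != " ":
--             return 0
--     return count
-- ===== SOURCE B (Python) =====
-- def count_diag1(board, symbol):
--     # pass 1: advance while the diagonal holds only our symbol or blanks
--     i = 0
--     while i < 3 and board[i][i] in (symbol, " "):
--         i += 1
--     if i < 3:
--         return 0
--     # pass 2: materialize the diagonal and count
--     return [board[k][k] for k in range(3)].count(symbol)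
-- ===== Notes on version B (the rewrite author's own statement) =====
-- stated objective: alternative
-- what changed: A's fused loop (running counter + early return on an opponent token) is replaced by staged passes: a counter-free validation scan that only advances an index, then, if the whole diagonal is clean, a comprehension materializing the diagonal and a .count(symbol) on it.
import Mathlib
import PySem

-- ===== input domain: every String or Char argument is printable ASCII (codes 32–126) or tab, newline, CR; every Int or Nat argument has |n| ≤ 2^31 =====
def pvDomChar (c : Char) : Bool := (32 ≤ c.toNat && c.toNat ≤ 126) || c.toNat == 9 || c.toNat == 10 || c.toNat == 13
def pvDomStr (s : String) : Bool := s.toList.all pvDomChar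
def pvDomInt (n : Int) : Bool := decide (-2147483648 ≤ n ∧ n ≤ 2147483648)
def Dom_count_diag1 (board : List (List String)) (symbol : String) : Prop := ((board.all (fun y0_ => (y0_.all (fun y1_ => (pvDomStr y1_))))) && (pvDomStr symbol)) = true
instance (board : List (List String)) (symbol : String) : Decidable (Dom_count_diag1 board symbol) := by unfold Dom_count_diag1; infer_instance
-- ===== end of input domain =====

-- B replaces A's fused count-and-guard loop by staged passes: a counter-free validation scan,
-- then a comprehension materializing the diagonal and a count on it; objective: alternative.

-- ===== PORT A =====
-- A's loop over range(3) with the early `return 0`; board[i][i] via pyGet? (none = IndexError, outside Pre_).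
def count_diag1Loop (board : List (List String)) (symbol : String) : List Int → Int → Int
  | [], count => count
  | i :: rest, count =>
    match (PySem.List.pyGet? board i).bind (fun r => PySem.List.pyGet? r i) with
    | none => 0  -- IndexError: excluded by Pre_count_diag1
    | some c =>
      if c == symbol then count_diag1Loop board symbol rest (count + 1)
      else if c != " " then 0
      else count_diag1Loop board symbol rest count

def count_diag1 (board : List (List String)) (symbol : String) : Int :=
  count_diag1Loop board symbol (PySem.List.pyRange 0 3 1) 0

-- ===== PORT B =====
-- pass 1: `while i < 3 and board[i][i] in (symbol, " "): i += 1`, as recursion over the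
-- remaining indices [i, …, 2]; returns the final i (none = IndexError, outside Pre_).
def count_diag1AltWhile (board : List (List String)) (symbol : String) : List Int → Option Int
  | [] => some 3
  | i :: rest =>
    match (PySem.List.pyGet? board i).bind (fun r => PySem.List.pyGet? r i) with
    | none => none  -- IndexError: excluded by Pre_count_diag1
    | some c =>
      if c == symbol || c == " " then count_diag1AltWhile board symbol rest
      else some i

-- `if i < 3: return 0` then `[board[k][k] for k in range(3)].count(symbol)`
def count_diag1_alt (board : List (List String)) (symbol : String) : Int :=
  match count_diag1AltWhile board symbol (PySem.List.pyRange 0 3 1) with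
  | none => 0  -- IndexError: excluded by Pre_count_diag1
  | some i =>
    if i < 3 then 0
    else
      match (PySem.List.pyRange 0 3 1).mapM
          (fun k => (PySem.List.pyGet? board k).bind (fun r => PySem.List.pyGet? r k)) with
      | none => 0  -- IndexError: unreachable once the validation pass consumed all indices
      | some diag => (PySem.List.count diag symbol : Int)

-- ===== PRECONDITION & SPEC =====
-- Pre_ is exactly A's (and B's) return domain, unrolled for the three diagonal cells: cell i must
-- exist unless an earlier cell already stopped the scan (an opponent token there).
def Pre_count_diag1 (board : List (List String)) (symbol : String) : Prop :=
  (0 < board.length ∧ 0 < (board.getD 0 []).length) ∧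
  (((board.getD 0 []).getD 0 "" ≠ symbol ∧ (board.getD 0 []).getD 0 "" ≠ " ") ∨
    ((1 < board.length ∧ 1 < (board.getD 1 []).length) ∧
      (((board.getD 1 []).getD 1 "" ≠ symbol ∧ (board.getD 1 []).getD 1 "" ≠ " ") ∨
        (2 < board.length ∧ 2 < (board.getD 2 []).length))))
instance (board : List (List String)) (symbol : String) : Decidable (Pre_count_diag1 board symbol) := by
  unfold Pre_count_diag1; infer_instance

def pvWitness_count_diag1 : List (List String) × String :=
  ([["X", " ", " "], [" ", "X", " "], [" ", " ", "O"]], "X")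

def Spec_count_diag1 (board : List (List String)) (symbol : String) (out : Int) : Prop := out = count_diag1_alt board symbol
instance (board : List (List String)) (symbol : String) (out : Int) : Decidable (Spec_count_diag1 board symbol out) := by unfold Spec_count_diag1; infer_instance

-- ===== CLAIM =====
def Claim_equal_count_diag1 : Prop := ∀ (board : List (List String)) (symbol : String), Dom_count_diag1 board symbol → Pre_count_diag1 board symbol → Spec_count_diag1 board symbol (count_diag1 board symbol)

-- ===== LEMMAS AND PROOFS =====
-- the diagonal cell board[i][i] as a some-value when both indexings are in range
theorem cell_at (board : List (List String)) (i : Nat) (hb : i < board.length)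
    (hr : i < (board.getD i []).length) :
    (PySem.List.pyGet? board (i : Int)).bind (fun r => PySem.List.pyGet? r (i : Int)) =
      some ((board.getD i []).getD i "") := by
  have h1 : board.getD i [] = board[i] := List.getD_eq_getElem board [] hb
  rw [h1] at hr ⊢
  rw [List.getD_eq_getElem _ _ hr]
  simp only [PySem.List.pyGet?_natCast, List.getElem?_eq_getElem hb, Option.bind_some,
    List.getElem?_eq_getElem hr]

set_option maxHeartbeats 1000000 in
-- ===== VERDICT =====
theorem count_diag1_spec : Claim_equal_count_diag1 := by
  intro board symbol _ hpre
  obtain ⟨⟨e0b, e0r⟩, hnext⟩ := hpre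
  show count_diag1 board symbol = count_diag1_alt board symbol
  have hrange : PySem.List.pyRange 0 3 1 = [0, 1, 2] := by decide
  have c0 := cell_at board 0 e0b e0r
  norm_num at c0
  simp only [count_diag1, count_diag1_alt, hrange, count_diag1Loop, count_diag1AltWhile, c0]
  rcases hnext with ⟨hs0a, hs0b⟩ | ⟨⟨e1b, e1r⟩, hnext⟩
  · simp_all
  · have c1 := cell_at board 1 e1b e1r
    norm_num at c1
    simp only [c1]
    rcases hnext with ⟨hs1a, hs1b⟩ | ⟨e2b, e2r⟩
    · by_cases h0a : (board.getD 0 []).getD 0 "" = symbol <;>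
        by_cases h0b : (board.getD 0 []).getD 0 "" = " " <;>
        simp_all
    · have c2 := cell_at board 2 e2b e2r
      norm_num at c2
      simp only [c2, List.mapM_cons, List.mapM_nil, Option.pure_def, PySem.List.count]
      by_cases h0a : (board.getD 0 []).getD 0 "" = symbol <;>
        by_cases h0b : (board.getD 0 []).getD 0 "" = " " <;>
        by_cases h1a : (board.getD 1 []).getD 1 "" = symbol <;>
        by_cases h1b : (board.getD 1 []).getD 1 "" = " " <;>
        by_cases h2a : (board.getD 2 []).getD 2 "" = symbol <;>
        by_cases h2b : (board.getD 2 []).getD 2 "" = " " <;>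
        simp_all
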